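-- pv_equiv track=rewrite | github.com/beerwatch/HodynyQ | CON_HodynyQ.py | _dayPlan
-- ===== SOURCE A (Python) =====
-- def _dayPlan( d, t ):
--     p = None
--     b = None
--     e = t[3] * 60 + t[4]
--     for k,v in sorted(d.items()):
--         if b is None:
--             b = k
--         if k <= e:
--             p = v
--             b = None
--     return [ p if p != None else v , 60 * ( b if b != None else 0 ) ]
-- ===== SOURCE B (Python) =====
-- def _dayPlan(d, t):
--     e = t[3] * 60 + t[4]
--     p_key = None; p_val = None   # largest key <= e and its value
--     b = None                     # smallest key > e
--     m_key = None; m_val = None   # largest key overall and its value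
--     for k, v in d.items():
--         if k <= e:
--             if p_key is None or p_key < k:
--                 p_key, p_val = k, v
--         else:
--             if b is None or k < b:
--                 b = k
--         if m_key is None or m_key < k:
--             m_key, m_val = k, v
--     return [p_val if p_key is not None else m_val, 60 * (b if b is not None else 0)]
-- ===== Notes on version B (the rewrite author's own statement) =====
-- stated objective: faster
-- what changed: Replaces sort-then-scan (with the None-reset trick for the next key) by a single unsorted pass tracking three extrema: largest key <= e with its value, smallest key > e, and the overall largest key with its value.
import Mathlib
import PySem

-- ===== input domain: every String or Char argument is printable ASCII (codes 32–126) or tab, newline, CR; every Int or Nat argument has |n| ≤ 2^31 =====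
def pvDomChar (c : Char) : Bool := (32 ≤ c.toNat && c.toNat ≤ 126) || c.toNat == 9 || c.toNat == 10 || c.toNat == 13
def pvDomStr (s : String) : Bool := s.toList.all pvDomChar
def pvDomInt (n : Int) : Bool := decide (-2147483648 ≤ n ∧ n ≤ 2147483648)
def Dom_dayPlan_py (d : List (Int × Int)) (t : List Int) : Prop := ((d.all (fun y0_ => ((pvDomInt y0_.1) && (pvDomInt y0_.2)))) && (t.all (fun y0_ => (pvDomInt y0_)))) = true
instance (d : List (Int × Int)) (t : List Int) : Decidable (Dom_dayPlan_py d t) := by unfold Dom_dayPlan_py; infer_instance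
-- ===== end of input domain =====

-- B replaces A's sort-then-scan by one unsorted pass tracking three extrema (objective: faster, O(n) vs O(n log n)).

-- ===== PORT A =====
-- loop body of A: b is filled when None, then 'k <= e' overwrites p and resets b; v (third component) is the loop variable
def stepA_dayPlan (e : Int) (s : Option Int × Option Int × Option Int) (kv : Int × Int) :
    Option Int × Option Int × Option Int :=
  let b1 : Option Int := match s.2.1 with | none => some kv.1 | some x => some x
  if kv.1 ≤ e then (some kv.2, none, some kv.2) else (s.1, b1, some kv.2)

def dayPlan_py (d : List (Int × Int)) (t : List Int) : List Int :=
  let e : Int := (PySem.List.pyGet? t 3).getD 0 * 60 + (PySem.List.pyGet? t 4).getD 0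
  let st := (PySem.List.sorted2 (PySem.Dict.ofList d).items (fun p => p.1) (fun p => p.2) false).foldl
      (stepA_dayPlan e) (none, none, none)
  [ (match st.1 with | some p => p | none => st.2.2.getD 0),
    60 * (match st.2.1 with | some b => b | none => 0) ]

-- ===== PORT B =====
-- largest key ≤ e with its value
def stepP_dayPlan (e : Int) (s : Option (Int × Int)) (kv : Int × Int) : Option (Int × Int) :=
  if kv.1 ≤ e then
    match s with | none => some kv | some pr => if pr.1 < kv.1 then some kv else some pr
  else s

-- smallest key > e
def stepB_dayPlan (e : Int) (s : Option Int) (kv : Int × Int) : Option Int :=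
  if kv.1 ≤ e then s
  else match s with | none => some kv.1 | some bk => if kv.1 < bk then some kv.1 else some bk

-- largest key overall with its value
def stepM_dayPlan (s : Option (Int × Int)) (kv : Int × Int) : Option (Int × Int) :=
  match s with | none => some kv | some pr => if pr.1 < kv.1 then some kv else some pr

def dayPlan_py_alt (d : List (Int × Int)) (t : List Int) : List Int :=
  let e : Int := (PySem.List.pyGet? t 3).getD 0 * 60 + (PySem.List.pyGet? t 4).getD 0
  let st := (PySem.Dict.ofList d).items.foldl
      (fun (s : Option (Int × Int) × Option Int × Option (Int × Int)) kv =>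
        (stepP_dayPlan e s.1 kv, stepB_dayPlan e s.2.1 kv, stepM_dayPlan s.2.2 kv))
      (none, none, none)
  [ (match st.1 with
     | some pr => pr.2
     | none => match st.2.2 with | some mr => mr.2 | none => 0),
    60 * (match st.2.1 with | some b => b | none => 0) ]

-- ===== PRECONDITION & SPEC =====
-- Pre_ excludes exactly the inputs where A raises: t shorter than 5 (IndexError on t[3]/t[4])
-- and the empty dict (UnboundLocalError: 'v' in the return expression is never bound).
def Pre_dayPlan_py (d : List (Int × Int)) (t : List Int) : Prop := d ≠ [] ∧ 5 ≤ t.length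
instance (d : List (Int × Int)) (t : List Int) : Decidable (Pre_dayPlan_py d t) := by unfold Pre_dayPlan_py; infer_instance
def pvWitness_dayPlan_py : (List (Int × Int)) × List Int := ([(1, 2)], [0, 0, 0, 1, 0])

def Spec_dayPlan_py (d : List (Int × Int)) (t : List Int) (out : List Int) : Prop := out = dayPlan_py_alt d t
instance (d : List (Int × Int)) (t : List Int) (out : List Int) : Decidable (Spec_dayPlan_py d t out) := by unfold Spec_dayPlan_py; infer_instance

-- ===== CLAIM (what is proved, stated in full; the proofs are below) =====
def Claim_equal_dayPlan_py : Prop := ∀ (d : List (Int × Int)) (t : List Int), Dom_dayPlan_py d t → Pre_dayPlan_py d t → Spec_dayPlan_py d t (dayPlan_py d t)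

-- ===== LEMMAS AND PROOFS =====

-- sorted2's output is pairwise nondecreasing in the first key
theorem pvInsertBy_pairwise_fst {α : Type} (key : α → Int) (before : α → α → Bool)
    (hb : ∀ a b, (before a b = true → key a ≤ key b) ∧ (before a b = false → key b ≤ key a))
    (x : α) : ∀ (ys : List α), ys.Pairwise (fun a b => key a ≤ key b) →
      (PySem.List.insertBy before x ys).Pairwise (fun a b => key a ≤ key b) := by
  intro ys
  induction ys with
  | nil => intro _; rw [PySem.List.insertBy.eq_1]; simp
  | cons y ys ih =>
    intro h
    rcases List.pairwise_cons.mp h with ⟨hy, hys⟩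
    rw [PySem.List.insertBy.eq_2]
    by_cases hxy : before x y = true
    · rw [if_pos hxy]
      refine List.pairwise_cons.mpr ⟨?_, h⟩
      intro a ha
      rcases List.mem_cons.mp ha with rfl | ha
      · exact (hb x a).1 hxy
      · exact le_trans ((hb x y).1 hxy) (hy a ha)
    · rw [if_neg hxy]
      refine List.pairwise_cons.mpr ⟨?_, ih hys⟩
      intro a ha
      rcases (PySem.List.insertBy_mem_iff before x a ys).mp ha with h1 | ha2
      · exact le_of_le_of_eq ((hb x y).2 (Bool.eq_false_iff.mpr hxy)) (congrArg key h1).symm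
      · exact hy a ha2

theorem pvSorted2_pairwise_fst (L : List (Int × Int)) :
    (PySem.List.sorted2 L (fun p => p.1) (fun p => p.2) false).Pairwise
      (fun a b => a.1 ≤ b.1) := by
  have hb : ∀ a b : Int × Int,
      ((fun a b : Int × Int => decide (a.1 < b.1) || (!decide (b.1 < a.1) && decide (a.2 < b.2))) a b = true →
        a.1 ≤ b.1) ∧
      ((fun a b : Int × Int => decide (a.1 < b.1) || (!decide (b.1 < a.1) && decide (a.2 < b.2))) a b = false →
        b.1 ≤ a.1) := by
    intro a b
    constructor <;> intro h <;> simp only [Bool.or_eq_true, Bool.or_eq_false_iff,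
      Bool.and_eq_true, Bool.and_eq_false_iff, Bool.not_eq_true', Bool.not_eq_false',
      decide_eq_true_eq, decide_eq_false_iff_not] at h <;> omega
  have main : ∀ (M acc : List (Int × Int)), acc.Pairwise (fun a b => a.1 ≤ b.1) →
      (M.foldl (fun acc x => PySem.List.insertBy
        (fun a b : Int × Int => decide (a.1 < b.1) || (!decide (b.1 < a.1) && decide (a.2 < b.2))) x acc) acc).Pairwise
        (fun a b => a.1 ≤ b.1) := by
    intro M
    induction M with
    | nil => intro acc h; exact h
    | cons m M ih =>
      intro acc h
      exact ih _ (pvInsertBy_pairwise_fst (fun p => p.1) _ hb m acc h)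
  simpa [PySem.List.sorted2] using main L [] (by simp)

theorem pvDropWhile_gt (e : Int) : ∀ (S : List (Int × Int)),
    S.Pairwise (fun a b => a.1 < b.1) →
    ∀ x ∈ S.dropWhile (fun x => decide (x.1 ≤ e)), e < x.1 := by
  intro S
  induction S with
  | nil => intro _ x hx; simp [List.dropWhile] at hx
  | cons a S ih =>
    intro h x hx
    rcases List.pairwise_cons.mp h with ⟨ha, hS⟩
    by_cases hae : a.1 ≤ e
    · rw [List.dropWhile_cons_of_pos (by simpa using hae)] at hx
      exact ih hS x hx
    · rw [List.dropWhile_cons_of_neg (by simpa using hae)] at hx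
      rcases List.mem_cons.mp hx with rfl | hx
      · omega
      · have := ha x hx; omega

theorem pvFoldA_le (e : Int) : ∀ (P : List (Int × Int)) (s : Option Int × Option Int × Option Int),
    (∀ x ∈ P, x.1 ≤ e) →
    P.foldl (stepA_dayPlan e) s =
      match P.getLast? with | none => s | some x => (some x.2, none, some x.2) := by
  intro P
  induction P with
  | nil => intro s _; rfl
  | cons a P ih =>
    intro s h
    have ha : a.1 ≤ e := h a (by simp)
    rw [List.foldl_cons, show stepA_dayPlan e s a = (some a.2, none, some a.2) by
      simp [stepA_dayPlan, ha]]
    rw [ih _ (fun x hx => h x (by simp [hx]))]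
    cases P with
    | nil => rfl
    | cons b P =>
      rw [List.getLast?_cons_cons]
      cases hbp : (b :: P).getLast? with
      | none => simp at hbp
      | some x => rfl

theorem pvFoldA_gt (e : Int) : ∀ (Q : List (Int × Int)) (s : Option Int × Option Int × Option Int),
    (∀ x ∈ Q, e < x.1) →
    Q.foldl (stepA_dayPlan e) s =
      (s.1, (match s.2.1 with | some b => some b | none => Q.head?.map (fun x => x.1)),
       match Q.getLast? with | none => s.2.2 | some x => some x.2) := by
  intro Q
  induction Q with
  | nil =>
    intro s _
    rcases s with ⟨p, b, v⟩
    rcases b <;> rfl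
  | cons a Q ih =>
    intro s h
    have ha : e < a.1 := h a (by simp)
    have hstep : stepA_dayPlan e s a =
        (s.1, (match s.2.1 with | none => some a.1 | some x => some x), some a.2) := by
      simp [stepA_dayPlan, show ¬ a.1 ≤ e by omega]
    rw [List.foldl_cons, hstep, ih _ (fun x hx => h x (by simp [hx]))]
    cases hs : s.2.1 with
    | none =>
      cases Q with
      | nil => rfl
      | cons b Q =>
        rw [List.getLast?_cons_cons]
        cases hbp : (b :: Q).getLast? with
        | none => simp at hbp
        | some x => rfl
    | some bb =>
      cases Q with
      | nil => rfl
      | cons b Q =>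
        rw [List.getLast?_cons_cons]
        cases hbp : (b :: Q).getLast? with
        | none => simp at hbp
        | some x => rfl

theorem pvStepP_comm (e : Int) (x y : Int × Int) (h : x.1 ≠ y.1) (z : Option (Int × Int)) :
    stepP_dayPlan e (stepP_dayPlan e z x) y = stepP_dayPlan e (stepP_dayPlan e z y) x := by
  by_cases hx : x.1 ≤ e <;> by_cases hy : y.1 ≤ e <;> rcases z with _ | ⟨zk, zv⟩ <;>
    simp only [stepP_dayPlan, hx, hy, if_pos, if_neg, not_false_iff] <;>
    split_ifs <;> (try dsimp only) <;> (try split_ifs) <;>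
    first
      | rfl
      | (exfalso; omega)

theorem pvStepB_comm (e : Int) (x y : Int × Int) (z : Option Int) :
    stepB_dayPlan e (stepB_dayPlan e z x) y = stepB_dayPlan e (stepB_dayPlan e z y) x := by
  by_cases hx : x.1 ≤ e <;> by_cases hy : y.1 ≤ e <;> rcases z with _ | zk <;>
    simp only [stepB_dayPlan, hx, hy, if_pos, if_neg, not_false_iff] <;>
    split_ifs <;> (try dsimp only) <;> (try split_ifs) <;>
    first
      | rfl
      | (exfalso; omega)
      | (simp only [Option.some.injEq]; omega)

theorem pvStepM_comm (x y : Int × Int) (h : x.1 ≠ y.1) (z : Option (Int × Int)) :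
    stepM_dayPlan (stepM_dayPlan z x) y = stepM_dayPlan (stepM_dayPlan z y) x := by
  rcases z with _ | ⟨zk, zv⟩ <;> simp only [stepM_dayPlan] <;>
    split_ifs <;> (try dsimp only) <;> (try split_ifs) <;>
    first
      | rfl
      | (exfalso; omega)

theorem pvFoldP_le (e : Int) : ∀ (P : List (Int × Int)) (s : Option (Int × Int)),
    (∀ x ∈ P, x.1 ≤ e) → P.Pairwise (fun a b => a.1 < b.1) →
    (∀ pr, s = some pr → ∀ x ∈ P, pr.1 < x.1) →
    P.foldl (stepP_dayPlan e) s = match P.getLast? with | none => s | some x => some x := by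
  intro P
  induction P with
  | nil => intro s _ _ _; rfl
  | cons a P ih =>
    intro s h hp hs
    rcases List.pairwise_cons.mp hp with ⟨haP, hpP⟩
    have ha : a.1 ≤ e := h a (by simp)
    have hstep : stepP_dayPlan e s a = some a := by
      rcases s with _ | pr
      · simp [stepP_dayPlan, ha]
      · have := hs pr rfl a (by simp)
        simp [stepP_dayPlan, ha, this]
    rw [List.foldl_cons, hstep, ih _ (fun x hx => h x (by simp [hx])) hpP
      (fun pr hpr x hx => (Option.some.inj hpr) ▸ haP x hx)]
    cases P with
    | nil => rfl
    | cons b P =>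
      rw [List.getLast?_cons_cons]
      cases hbp : (b :: P).getLast? with
      | none => simp at hbp
      | some x => rfl

theorem pvFoldP_gt (e : Int) : ∀ (Q : List (Int × Int)) (s : Option (Int × Int)),
    (∀ x ∈ Q, e < x.1) → Q.foldl (stepP_dayPlan e) s = s := by
  intro Q
  induction Q with
  | nil => intro s _; rfl
  | cons a Q ih =>
    intro s h
    have ha : e < a.1 := h a (by simp)
    rw [List.foldl_cons, show stepP_dayPlan e s a = s by simp [stepP_dayPlan, not_le.mpr ha]]
    exact ih _ (fun x hx => h x (by simp [hx]))

theorem pvFoldB_le (e : Int) : ∀ (P : List (Int × Int)) (s : Option Int),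
    (∀ x ∈ P, x.1 ≤ e) → P.foldl (stepB_dayPlan e) s = s := by
  intro P
  induction P with
  | nil => intro s _; rfl
  | cons a P ih =>
    intro s h
    have ha : a.1 ≤ e := h a (by simp)
    rw [List.foldl_cons, show stepB_dayPlan e s a = s by simp [stepB_dayPlan, ha]]
    exact ih _ (fun x hx => h x (by simp [hx]))

theorem pvFoldB_stay (e : Int) : ∀ (Q : List (Int × Int)) (b : Int),
    (∀ x ∈ Q, b ≤ x.1) → Q.foldl (stepB_dayPlan e) (some b) = some b := by
  intro Q
  induction Q with
  | nil => intro b _; rfl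
  | cons a Q ih =>
    intro b h
    have ha : b ≤ a.1 := h a (by simp)
    have hstep : stepB_dayPlan e (some b) a = some b := by
      by_cases hae : a.1 ≤ e <;> simp [stepB_dayPlan, hae, not_lt.mpr ha]
    rw [List.foldl_cons, hstep]
    exact ih _ (fun x hx => h x (by simp [hx]))

theorem pvFoldB_gt_none (e : Int) : ∀ (Q : List (Int × Int)),
    (∀ x ∈ Q, e < x.1) → Q.Pairwise (fun a b => a.1 < b.1) →
    Q.foldl (stepB_dayPlan e) none = Q.head?.map (fun x => x.1) := by
  intro Q h hp
  cases Q with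
  | nil => rfl
  | cons a Q =>
    have ha : e < a.1 := h a (by simp)
    rcases List.pairwise_cons.mp hp with ⟨haQ, _⟩
    rw [List.foldl_cons, show stepB_dayPlan e none a = some a.1 by
      simp [stepB_dayPlan, not_le.mpr ha]]
    rw [pvFoldB_stay e Q a.1 (fun x hx => le_of_lt (haQ x hx))]
    rfl

theorem pvFoldM (L : List (Int × Int)) : ∀ (s : Option (Int × Int)),
    L.Pairwise (fun a b => a.1 < b.1) → (∀ pr, s = some pr → ∀ x ∈ L, pr.1 < x.1) →
    L.foldl stepM_dayPlan s = match L.getLast? with | none => s | some x => some x := by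
  induction L with
  | nil => intro s _ _; rfl
  | cons a L ih =>
    intro s hp hs
    rcases List.pairwise_cons.mp hp with ⟨haL, hpL⟩
    have hstep : stepM_dayPlan s a = some a := by
      rcases s with _ | pr
      · rfl
      · have := hs pr rfl a (by simp)
        simp [stepM_dayPlan, this]
    rw [List.foldl_cons, hstep, ih _ hpL
      (fun pr hpr x hx => (Option.some.inj hpr) ▸ haL x hx)]
    cases L with
    | nil => rfl
    | cons b L =>
      rw [List.getLast?_cons_cons]
      cases hbp : (b :: L).getLast? with
      | none => simp at hbp
      | some x => rfl

theorem pvItems_ofList_ne_nil (d : List (Int × Int)) (h : d ≠ []) :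
    (PySem.Dict.ofList d).items ≠ [] := by
  have hsize : ∀ (ps : List (Int × Int)) (d0 : PySem.Dict Int Int),
      d0.size ≤ (List.foldl (fun acc p => acc.insert p.1 p.2) d0 ps).size := by
    intro ps
    induction ps with
    | nil => intro d0; simp
    | cons p ps ih =>
      intro d0
      refine le_trans ?_ (ih (d0.insert p.1 p.2))
      rw [PySem.Dict.size_insert]
      split_ifs <;> omega
  cases d with
  | nil => exact absurd rfl h
  | cons p ps =>
    intro hnil
    have h1 : (PySem.Dict.ofList (p :: ps)).size = 0 := by
      simp [PySem.Dict.size, hnil]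
    have h2 : (PySem.Dict.empty.insert p.1 p.2 : PySem.Dict Int Int).size ≤
        (PySem.Dict.ofList (p :: ps)).size := by
      have := hsize ps (PySem.Dict.empty.insert p.1 p.2)
      simpa [PySem.Dict.ofList, PySem.Dict.update] using this
    rw [PySem.Dict.size_insert] at h2
    simp [PySem.Dict.size_empty, PySem.Dict.contains_empty] at h2
    omega

-- ===== VERDICT (by name: the statement is the Claim_ definition above) =====
theorem dayPlan_py_spec : Claim_equal_dayPlan_py := by
  intro d t _ hpre
  obtain ⟨hd, ht⟩ := hpre
  show dayPlan_py d t = dayPlan_py_alt d t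
  simp only [dayPlan_py, dayPlan_py_alt]
  generalize (PySem.List.pyGet? t 3).getD 0 * 60 + (PySem.List.pyGet? t 4).getD 0 = e
  set L := (PySem.Dict.ofList d).items with hLdef
  set S := PySem.List.sorted2 L (fun p => p.1) (fun p => p.2) false with hSdef
  have hperm : S.Perm L := PySem.List.sorted2_perm L _ _ false
  have hndL : (L.map (fun p => p.1)).Nodup := by
    have h := PySem.Dict.nodup_keys_ofList (κ := Int) (ν := Int) d
    simpa [PySem.Dict.keys] using h
  have hndS : (S.map (fun p => p.1)).Nodup := ((hperm.map (fun p => p.1)).nodup_iff).mpr hndL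
  have hle : S.Pairwise (fun a b => a.1 ≤ b.1) := pvSorted2_pairwise_fst L
  have hne : S.Pairwise (fun a b => a.1 ≠ b.1) := List.pairwise_map.mp hndS
  have hlt : S.Pairwise (fun a b => a.1 < b.1) :=
    (hle.and hne).imp (fun h => lt_of_le_of_ne h.1 h.2)
  have hkey : ∀ x ∈ L, ∀ y ∈ L, x ≠ y → x.1 ≠ y.1 := by
    intro x hx y hy hxy h1
    exact hxy (List.inj_on_of_nodup_map hndL hx hy h1)
  set P := S.takeWhile (fun x => decide (x.1 ≤ e)) with hPdef
  set Q := S.dropWhile (fun x => decide (x.1 ≤ e)) with hQdef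
  have hPQ : P ++ Q = S := List.takeWhile_append_dropWhile
  have hPle : ∀ x ∈ P, x.1 ≤ e := fun x hx => by
    have := List.mem_takeWhile_imp hx; simpa using this
  have hQgt : ∀ x ∈ Q, e < x.1 := pvDropWhile_gt e S hlt
  have hltPQ : (P ++ Q).Pairwise (fun a b => a.1 < b.1) := hPQ.symm ▸ hlt
  rcases List.pairwise_append.mp hltPQ with ⟨hltP, hltQ, hcross⟩
  have hSne : S ≠ [] := by
    intro h0
    exact pvItems_ofList_ne_nil d hd (List.Perm.eq_nil (h0 ▸ hperm.symm))
  -- B: split the triple fold into three independent folds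
  rw [PySem.List.foldl_prod_mk (f := stepP_dayPlan e)
      (g := fun (s : Option Int × Option (Int × Int)) kv =>
        (stepB_dayPlan e s.1 kv, stepM_dayPlan s.2 kv)),
    PySem.List.foldl_prod_mk (f := stepB_dayPlan e) (g := stepM_dayPlan)]
  -- B: reorder each fold to the sorted list S
  have hcomm : ∀ {σ : Type} (f : σ → (Int × Int) → σ),
      (∀ x y z, x.1 ≠ y.1 → f (f z x) y = f (f z y) x) →
      ∀ (init : σ), L.foldl f init = S.foldl f init := by
    intro σ f hf init
    refine List.Perm.foldl_eq' hperm.symm ?_ init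
    intro x hx y hy z
    by_cases hxy : x = y
    · subst hxy; rfl
    · exact hf x y z (hkey x hx y hy hxy)
  rw [hcomm (stepP_dayPlan e) (fun x y z h => pvStepP_comm e x y h z) none,
    hcomm (stepB_dayPlan e) (fun x y z _ => pvStepB_comm e x y z) none,
    hcomm stepM_dayPlan (fun x y z h => pvStepM_comm x y h z) none]
  -- evaluate all folds over S = P ++ Q
  have hPfold : S.foldl (stepP_dayPlan e) none =
      match P.getLast? with | none => none | some x => some x := by
    rw [← hPQ, List.foldl_append,
      pvFoldP_le e P none hPle hltP (by intro pr h; simp at h)]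
    cases hp : P.getLast? with
    | none => exact pvFoldP_gt e Q none hQgt
    | some x => exact pvFoldP_gt e Q _ hQgt
  have hBfold : S.foldl (stepB_dayPlan e) none = Q.head?.map (fun x => x.1) := by
    rw [← hPQ, List.foldl_append, pvFoldB_le e P none hPle]
    exact pvFoldB_gt_none e Q hQgt hltQ
  have hMfold : S.foldl stepM_dayPlan none =
      match S.getLast? with | none => none | some x => some x :=
    pvFoldM S none hlt (by intro pr h; simp at h)
  have hSlast : S.getLast? = Q.getLast?.or P.getLast? := by
    rw [← hPQ, List.getLast?_append]
  have hAfold : S.foldl (stepA_dayPlan e) (none, none, none) =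
      ((match P.getLast? with | none => (none : Option Int) | some x => some x.2),
       (match (match P.getLast? with
               | none => (none : Option Int)
               | some _ => none) with
        | some b => some b
        | none => Q.head?.map (fun x => x.1)),
       (match Q.getLast? with
        | none => (match P.getLast? with
                   | none => (none : Option Int)
                   | some x => some x.2)
        | some x => some x.2)) := by
    rw [← hPQ, List.foldl_append, pvFoldA_le e P _ hPle, pvFoldA_gt e Q _ hQgt]
    cases hp : P.getLast? <;> rfl
  rw [hAfold, hPfold, hBfold, hMfold, hSlast]
  -- finish by cases on the ends of P and Q
  cases hp : P.getLast? with
  | some xP => cases hq : Q.getLast? <;> rfl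
  | none =>
    have hPnil : P = [] := List.getLast?_eq_none_iff.mp hp
    cases hq : Q.getLast? with
    | some xQ => rfl
    | none =>
      have hQnil : Q = [] := List.getLast?_eq_none_iff.mp hq
      exact absurd (by rw [← hPQ, hPnil, hQnil]; rfl) hSne
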